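-- pv_equiv track=rewrite | github.com/dragosthealex/adventofcode2017 | 04/aoc_d04.py | is_valid_passphrase
-- ===== SOURCE A (Python) =====
-- def is_valid_passphrase(passphrase):
--     words = set()
--     for word in passphrase.split():
--         word = word.strip()
--         if word in words:
--             return False
--         words.add(word)
--     return True
-- ===== SOURCE B (Python) =====
-- def is_valid_passphrase(passphrase):
--     words = sorted(passphrase.split())
--     return all(a != b for a, b in zip(words, words[1:]))
-- ===== Notes on version B (the rewrite author's own statement) =====
-- stated objective: alternative
-- what changed: B sorts the word list and checks that no two adjacent words are equal, replacing A's hash-set loop with incremental insertion, membership test and early return by a sort-then-adjacent-scan with no set at all.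
import Mathlib
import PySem

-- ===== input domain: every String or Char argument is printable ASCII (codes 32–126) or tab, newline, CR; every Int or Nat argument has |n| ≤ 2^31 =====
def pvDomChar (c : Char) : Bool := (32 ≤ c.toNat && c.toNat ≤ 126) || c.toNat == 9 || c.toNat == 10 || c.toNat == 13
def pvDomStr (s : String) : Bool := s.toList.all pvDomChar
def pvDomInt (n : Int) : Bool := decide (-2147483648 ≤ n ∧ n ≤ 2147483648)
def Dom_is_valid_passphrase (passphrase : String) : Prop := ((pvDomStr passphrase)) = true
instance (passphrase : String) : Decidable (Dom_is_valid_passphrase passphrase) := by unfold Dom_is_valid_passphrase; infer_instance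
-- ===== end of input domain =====

-- B sorts the word list and checks adjacent words for equality instead of A's
-- hash-set loop with early exit: an alternative algorithm using no set at all.

-- ===== PORT A =====
-- A's for-loop with early 'return False': structural recursion over the word list,
-- carrying the growing set 'words'.
def pvLoopA : List String → PySem.Set String → Bool
  | [], _ => true
  | w :: rest, words =>
    let w' := PySem.Str.strip w
    if PySem.Set.contains words w' then false
    else pvLoopA rest (PySem.Set.add words w')

def is_valid_passphrase (passphrase : String) : Bool :=
  pvLoopA (PySem.Str.split₀ passphrase) PySem.Set.empty

-- ===== PORT B =====
def is_valid_passphrase_alt (passphrase : String) : Bool :=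
  let words := PySem.List.sorted (PySem.Str.split₀ passphrase) (fun w => w) false
  (words.zip (PySem.List.slice words (some 1) none)).all (fun p => p.1 != p.2)

-- ===== PRECONDITION & SPEC =====
def Spec_is_valid_passphrase (passphrase : String) (out : Bool) : Prop := out = is_valid_passphrase_alt passphrase
instance (passphrase : String) (out : Bool) : Decidable (Spec_is_valid_passphrase passphrase out) := by unfold Spec_is_valid_passphrase; infer_instance

-- ===== CLAIM (what is proved, stated in full; the proofs are below) =====
def Claim_equal_is_valid_passphrase : Prop := ∀ (passphrase : String), Dom_is_valid_passphrase passphrase → Spec_is_valid_passphrase passphrase (is_valid_passphrase passphrase)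

-- ===== LEMMAS AND PROOFS =====

-- words produced by split() contain no whitespace characters
theorem pv_split₀_go_no_space (s cur : List Char) (acc : List (List Char))
    (hcur : ∀ c ∈ cur, ¬ PySem.Chars.isspace c)
    (hacc : ∀ w ∈ acc, ∀ c ∈ w, ¬ PySem.Chars.isspace c) :
    ∀ w ∈ PySem.Chars.split₀.go s cur acc, ∀ c ∈ w, ¬ PySem.Chars.isspace c := by
  induction s generalizing cur acc with
  | nil =>
    intro w hw
    unfold PySem.Chars.split₀.go at hw
    split at hw
    · exact hacc w (by simpa using hw)
    · rcases List.mem_cons.mp (List.mem_reverse.mp hw) with h | h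
      · subst h; intro c hc; exact hcur c (List.mem_reverse.mp hc)
      · exact hacc w h
  | cons c rest ih =>
    intro w hw
    unfold PySem.Chars.split₀.go at hw
    by_cases hsp : PySem.Chars.isspace c = true
    · simp only [hsp, if_true] at hw
      split at hw
      · exact ih [] acc (by simp) hacc w hw
      · refine ih [] (cur.reverse :: acc) (by simp) ?_ w hw
        intro v hv
        rcases List.mem_cons.mp hv with h | h
        · subst h; intro d hd; exact hcur d (List.mem_reverse.mp hd)
        · exact hacc v h
    · rw [if_neg hsp] at hw
      refine ih (c :: cur) acc ?_ hacc w hw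
      intro d hd
      rcases List.mem_cons.mp hd with h | h
      · subst h; simpa using hsp
      · exact hcur d h

theorem pv_strip_id_of_no_space (l : List Char)
    (h : ∀ c ∈ l, ¬ PySem.Chars.isspace c) : PySem.Chars.strip l = l := by
  have hdw : ∀ m : List Char, (∀ c ∈ m, ¬ PySem.Chars.isspace c) →
      List.dropWhile PySem.Chars.isspace m = m := by
    intro m hm
    cases m with
    | nil => rfl
    | cons x xs =>
      simp [List.dropWhile, Bool.eq_false_iff.mpr (hm x (by simp))]
  unfold PySem.Chars.strip PySem.Chars.lstrip PySem.Chars.rstrip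
  rw [hdw l h, hdw l.reverse (fun c hc => h c (List.mem_reverse.mp hc)), List.reverse_reverse]

theorem pv_strip_word (p : String) (w : String) (hw : w ∈ PySem.Str.split₀ p) :
    PySem.Str.strip w = w := by
  unfold PySem.Str.split₀ at hw
  rcases List.mem_map.mp hw with ⟨l, hl, rfl⟩
  have hns : ∀ c ∈ l, ¬ PySem.Chars.isspace c :=
    pv_split₀_go_no_space p.toList [] [] (by simp) (by simp) l hl
  show String.ofList (PySem.Chars.strip (String.ofList l).toList) = _
  rw [String.toList_ofList, pv_strip_id_of_no_space l hns]

-- A's loop returns true iff the (stripped = unstripped) words are pairwise distinct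
-- and none of them is already in the starting set.
theorem pvLoopA_iff (ws : List String) (seen : PySem.Set String)
    (hstrip : ∀ w ∈ ws, PySem.Str.strip w = w) :
    pvLoopA ws seen = true ↔ ws.Nodup ∧ ∀ w ∈ ws, PySem.Set.contains seen w = false := by
  induction ws generalizing seen with
  | nil => simp [pvLoopA]
  | cons w rest ih =>
    have hw : PySem.Str.strip w = w := hstrip w (by simp)
    by_cases hc : PySem.Set.contains seen w = true
    · simp only [pvLoopA, hw, hc, if_true]
      constructor
      · intro h; cases h
      · rintro ⟨-, hall⟩
        have := hall w (by simp); rw [hc] at this; cases this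
    · have hcf : PySem.Set.contains seen w = false := Bool.eq_false_iff.mpr hc
      have hadd : PySem.Set.add seen w = seen ++ [w] := by
        unfold PySem.Set.add; rw [if_neg hc]
      have hcontains : ∀ v, PySem.Set.contains (seen ++ [w]) v =
          (PySem.Set.contains seen v || v == w) := by
        intro v
        by_cases h : v = w
        · subst h; simp [PySem.Set.contains]
        · simp [PySem.Set.contains, h, Ne.symm h]
      simp only [pvLoopA, hw]
      rw [if_neg hc, ih (PySem.Set.add seen w) (fun v hv => hstrip v (by simp [hv])), hadd]
      constructor
      · rintro ⟨hnd, hall⟩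
        have hne : ∀ v ∈ rest, v ≠ w := by
          intro v hv heq
          have := hall v hv
          rw [hcontains v] at this
          simp [heq] at this
        refine ⟨List.nodup_cons.mpr ⟨fun hmem => hne w hmem rfl, hnd⟩, ?_⟩
        intro v hv
        rcases List.mem_cons.mp hv with h | h
        · subst h; exact hcf
        · have := hall v h
          rw [hcontains v] at this
          exact (Bool.or_eq_false_iff.mp this).1
      · rintro ⟨hnd, hall⟩
        obtain ⟨hnotmem, hnd'⟩ := List.nodup_cons.mp hnd
        refine ⟨hnd', ?_⟩
        intro v hv
        rw [hcontains v]
        refine Bool.or_eq_false_iff.mpr ⟨hall v (by simp [hv]), ?_⟩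
        exact beq_eq_false_iff_ne.mpr (fun heq => hnotmem (heq ▸ hv))

-- on a list sorted in nondecreasing order, "no two adjacent elements equal" is Nodup
theorem pv_adjacent_nodup (s : List String) (hs : s.Pairwise (· ≤ ·)) :
    ((s.zip s.tail).all (fun p => p.1 != p.2)) = true ↔ s.Nodup := by
  induction s with
  | nil => simp
  | cons a t ih =>
    cases t with
    | nil => simp
    | cons b u =>
      obtain ⟨hab, hrest⟩ := List.pairwise_cons.mp hs
      have hbu := List.pairwise_cons.mp hrest
      have ihh := ih hrest
      simp only [List.tail_cons, List.zip_cons_cons, List.all_cons, Bool.and_eq_true,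
        bne_iff_ne, ne_eq] at ihh ⊢
      rw [ihh]
      constructor
      · rintro ⟨hne, hnd⟩
        refine List.nodup_cons.mpr ⟨?_, hnd⟩
        intro hmem
        rcases List.mem_cons.mp hmem with h | h
        · exact hne h
        · -- a ∈ u: then a ≤ b (adjacent) and b ≤ a (pairwise on b :: u), so a = b
          have h1 : a ≤ b := hab b (by simp)
          have h2 : b ≤ a := hbu.1 a h
          exact hne (le_antisymm h1 h2)
      · intro hnd
        obtain ⟨hnotmem, hnd'⟩ := List.nodup_cons.mp hnd
        exact ⟨fun heq => hnotmem (heq ▸ List.mem_cons_self), hnd'⟩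

-- ===== VERDICT (by name: the statement is the Claim_ definition above) =====
theorem is_valid_passphrase_spec : Claim_equal_is_valid_passphrase := by
  intro p _
  unfold Spec_is_valid_passphrase is_valid_passphrase is_valid_passphrase_alt
  set ws := PySem.Str.split₀ p with hws
  set s := PySem.List.sorted ws (fun w => w) false with hsdef
  simp only [PySem.List.slice_from_one]
  have hA : pvLoopA ws PySem.Set.empty = true ↔ ws.Nodup := by
    rw [pvLoopA_iff ws PySem.Set.empty (fun w hw => pv_strip_word p w hw)]
    simp [PySem.Set.empty, PySem.Set.contains]
  have hperm : s.Perm ws := PySem.List.sorted_perm ws (fun w => w) false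
  have hB : ((s.zip s.tail).all (fun p => p.1 != p.2)) = true ↔ ws.Nodup := by
    rw [pv_adjacent_nodup s (PySem.List.sorted_pairwise ws (fun w => w))]
    exact hperm.nodup_iff
  exact Bool.eq_iff_iff.mpr (hA.trans hB.symm)
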